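-- pv_equiv track=rewrite | github.com/NamHyeok-Kim/algorithm | nameg.py | sum_namenum
-- ===== SOURCE A (Python) =====
-- def sum_namenum(nameNum) -> int:
--     nameScore = []
--     if len(nameNum) == 2:
--         n = nameNum[0] * 10 + nameNum[1]
--         return n
--
--     for i in range(0, len(nameNum) - 1):
--         nameScore.append((nameNum[i] + nameNum[i + 1]) % 10)
--     return sum_namenum(nameScore)
-- ===== SOURCE B (Python) =====
-- def sum_namenum(nameNum) -> int:
--     # closed form: after k adjacent-sum-mod-10 reductions, entry i is
--     # sum_j C(k,j)*x[i+j] mod 10; the final pair uses k = len-2.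
--     n = len(nameNum)
--     if n == 2:
--         return nameNum[0] * 10 + nameNum[1]
--     m = n - 2
--     s0 = 0
--     s1 = 0
--     c = 1
--     for j in range(0, m + 1):
--         s0 += c * nameNum[j]
--         s1 += c * nameNum[j + 1]
--         c = c * (m - j) // (j + 1)
--     return (s0 % 10) * 10 + s1 % 10
-- ===== Notes on version B (the rewrite author's own statement) =====
-- stated objective: faster
-- what changed: Replaces the O(n^2) cascade of adjacent-sum-mod-10 reduction rows by the closed form: the final two digits are sums of binomial coefficients C(n-2,j) times the inputs, computed in one pass with an incrementally updated exact binomial coefficient.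
import Mathlib
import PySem

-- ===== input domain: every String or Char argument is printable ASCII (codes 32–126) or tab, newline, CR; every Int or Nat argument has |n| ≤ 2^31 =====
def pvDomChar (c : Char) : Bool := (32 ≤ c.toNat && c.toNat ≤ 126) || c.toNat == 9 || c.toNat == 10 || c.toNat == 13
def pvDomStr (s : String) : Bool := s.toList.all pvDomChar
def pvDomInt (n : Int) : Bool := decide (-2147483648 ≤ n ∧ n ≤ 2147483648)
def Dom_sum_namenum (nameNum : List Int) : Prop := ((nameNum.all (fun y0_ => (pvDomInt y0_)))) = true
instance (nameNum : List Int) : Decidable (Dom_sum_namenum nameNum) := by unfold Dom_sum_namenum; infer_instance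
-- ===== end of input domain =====

-- B replaces A's quadratic cascade of adjacent-sum-mod-10 reduction rows by the one-pass
-- binomial closed form (objective: faster).

-- ===== PORT A =====
-- one reduction row: [(x[i]+x[i+1]) % 10 for i in range(0, len(x)-1)]
def sum_namenum_step (xs : List Int) : List Int :=
  (PySem.List.pyRange 0 ((xs.length : Int) - 1) 1).foldl
    (fun acc i =>
      acc ++ [PySem.Int.mod (PySem.List.pyGetD xs i 0 + PySem.List.pyGetD xs (i + 1) 0) 10]) []

-- fuel = initial length (ample), only to make the recursion total; Python diverges on
-- length < 2, which Pre_ excludes.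
def sum_namenum_go : Nat → List Int → Int
  | 0, _ => 0
  | fuel + 1, xs =>
      if xs.length == 2 then
        PySem.List.pyGetD xs 0 0 * 10 + PySem.List.pyGetD xs 1 0
      else
        sum_namenum_go fuel (sum_namenum_step xs)

def sum_namenum (nameNum : List Int) : Int :=
  sum_namenum_go nameNum.length nameNum

-- ===== PORT B =====
def sum_namenum_alt (nameNum : List Int) : Int :=
  let n : Int := nameNum.length
  if n == 2 then
    PySem.List.pyGetD nameNum 0 0 * 10 + PySem.List.pyGetD nameNum 1 0
  else
    let m : Int := n - 2
    let r :=
      (PySem.List.pyRange 0 (m + 1) 1).foldl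
        (fun (acc : Int × Int × Int) j =>
          (acc.1 + acc.2.2 * PySem.List.pyGetD nameNum j 0,
           acc.2.1 + acc.2.2 * PySem.List.pyGetD nameNum (j + 1) 0,
           PySem.Int.floordiv (acc.2.2 * (m - j)) (j + 1))) (0, 0, 1)
    PySem.Int.mod r.1 10 * 10 + PySem.Int.mod r.2.1 10

-- ===== PRECONDITION & SPEC =====
-- On lists of length < 2 Python A recurses forever on an unchanged list (RecursionError).
def Pre_sum_namenum (nameNum : List Int) : Prop := 2 ≤ nameNum.length
instance (nameNum : List Int) : Decidable (Pre_sum_namenum nameNum) := by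
  unfold Pre_sum_namenum; infer_instance
def pvWitness_sum_namenum : List Int := ([1, 2, 3] : List Int)

def Spec_sum_namenum (nameNum : List Int) (out : Int) : Prop := out = sum_namenum_alt nameNum
instance (nameNum : List Int) (out : Int) : Decidable (Spec_sum_namenum nameNum out) := by
  unfold Spec_sum_namenum; infer_instance

-- ===== CLAIM (what is proved, stated in full; the proofs are below) =====
def Claim_equal_sum_namenum : Prop := ∀ (nameNum : List Int), Dom_sum_namenum nameNum → Pre_sum_namenum nameNum → Spec_sum_namenum nameNum (sum_namenum nameNum)

-- ===== LEMMAS AND PROOFS =====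

-- A's reduction row in closed form
theorem pv_step_eq (xs : List Int) :
    sum_namenum_step xs
      = (List.range (xs.length - 1)).map
          (fun k => (xs.getD k 0 + xs.getD (k + 1) 0) % 10) := by
  unfold sum_namenum_step
  rw [PySem.List.pyRange_one]
  rw [List.foldl_map, PySem.List.foldl_append_singleton_eq_map]
  have : ((xs.length : Int) - 1 - 0).toNat = xs.length - 1 := by omega
  rw [this]
  apply List.map_congr_left
  intro k hk
  simp at hk
  have h1 : (0 : Int) + k = (k : Int) := by ring
  rw [h1]
  have hmod : ∀ a : Int, PySem.Int.mod a 10 = a % 10 := fun a =>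
    PySem.Int.mod_eq_emod_of_pos (by norm_num)
  rw [hmod]
  rw [show (k : Int) + 1 = ((k + 1 : Nat) : Int) by push_cast; ring,
     PySem.List.pyGetD_natCast]
  rw [PySem.List.pyGetD_natCast]

-- binomial-weighted window sum: Σ_{j≤m} C(m,j) * xs[i+j]
def pvS (m i : Nat) (xs : List Int) : Int :=
  ∑ j ∈ Finset.range (m + 1), (Nat.choose m j : Int) * xs.getD (i + j) 0

-- Pascal step: one adjacent-sum pass raises the binomial row by one
theorem pv_pascal (m : Nat) (f : Nat → Int) :
    ∑ j ∈ Finset.range (m+1), (Nat.choose m j : Int) * (f j + f (j+1))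
      = ∑ j ∈ Finset.range (m+2), (Nat.choose (m+1) j : Int) * f j := by
  have h1 : ∑ j ∈ Finset.range (m+2), (Nat.choose (m+1) j : Int) * f j
      = (∑ j ∈ Finset.range (m+1), (Nat.choose (m+1) (j+1) : Int) * f (j+1)) + (Nat.choose (m+1) 0 : Int) * f 0 :=
    Finset.sum_range_succ' _ _
  have h2 : ∑ j ∈ Finset.range (m+2), (Nat.choose m j : Int) * f j
      = (∑ j ∈ Finset.range (m+1), (Nat.choose m (j+1) : Int) * f (j+1)) + (Nat.choose m 0 : Int) * f 0 :=
    Finset.sum_range_succ' _ _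
  have h3 : ∑ j ∈ Finset.range (m+2), (Nat.choose m j : Int) * f j
      = (∑ j ∈ Finset.range (m+1), (Nat.choose m j : Int) * f j) + (Nat.choose m (m+1) : Int) * f (m+1) :=
    Finset.sum_range_succ _ _
  have hsplit : ∑ j ∈ Finset.range (m+1), (Nat.choose (m+1) (j+1) : Int) * f (j+1)
      = (∑ j ∈ Finset.range (m+1), (Nat.choose m j : Int) * f (j+1))
        + ∑ j ∈ Finset.range (m+1), (Nat.choose m (j+1) : Int) * f (j+1) := by
    rw [← Finset.sum_add_distrib]
    refine Finset.sum_congr rfl (fun j _ => ?_)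
    rw [Nat.choose_succ_succ]; push_cast; ring
  have hL : ∑ j ∈ Finset.range (m+1), (Nat.choose m j : Int) * (f j + f (j+1))
      = (∑ j ∈ Finset.range (m+1), (Nat.choose m j : Int) * f j)
        + ∑ j ∈ Finset.range (m+1), (Nat.choose m j : Int) * f (j+1) := by
    rw [← Finset.sum_add_distrib]
    exact Finset.sum_congr rfl (fun j _ => by ring)
  have hz : (Nat.choose m (m+1) : Int) = 0 := by
    simp [Nat.choose_succ_self]
  rw [h1, hsplit, hL]
  rw [hz] at h3
  simp [Nat.choose_zero_right] at h1 h2 h3 ⊢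
  linarith [h2, h3]

theorem pv_length_step (xs : List Int) : (sum_namenum_step xs).length = xs.length - 1 := by
  rw [pv_step_eq]; simp

theorem pv_step_getD (xs : List Int) (k : Nat) (hk : k < xs.length - 1) :
    (sum_namenum_step xs).getD k 0 = (xs.getD k 0 + xs.getD (k + 1) 0) % 10 := by
  rw [pv_step_eq]
  rw [List.getD_eq_getElem?_getD]
  simp [hk]

-- the congruence mod 10 carried by one reduction row
theorem pvS_step (xs : List Int) (i m : Nat)
    (hm : m + 3 = xs.length) (hi : i ≤ 1) :
    pvS m i (sum_namenum_step xs) % 10 = pvS (m + 1) i xs % 10 := by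
  unfold pvS
  have hget : ∀ j ∈ Finset.range (m + 1),
      (Nat.choose m j : Int) * (sum_namenum_step xs).getD (i + j) 0
        = (Nat.choose m j : Int) * ((xs.getD (i + j) 0 + xs.getD (i + j + 1) 0) % 10) := by
    intro j hj
    rw [pv_step_getD xs (i + j) (by simp at hj; omega)]
  rw [Finset.sum_congr rfl hget]
  have hmod : (∑ j ∈ Finset.range (m + 1),
      (Nat.choose m j : Int) * ((xs.getD (i + j) 0 + xs.getD (i + j + 1) 0) % 10)) % 10
      = (∑ j ∈ Finset.range (m + 1),
      (Nat.choose m j : Int) * (xs.getD (i + j) 0 + xs.getD (i + j + 1) 0)) % 10 := by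
    rw [Finset.sum_int_mod, Finset.sum_int_mod
      (f := fun j => (Nat.choose m j : Int) * (xs.getD (i + j) 0 + xs.getD (i + j + 1) 0))]
    congr 1
    refine Finset.sum_congr rfl (fun j _ => ?_)
    rw [Int.mul_emod, Int.mul_emod (Nat.choose m j : Int), Int.emod_emod_of_dvd _ dvd_rfl]
  rw [hmod]
  have hid : (∑ j ∈ Finset.range (m + 1),
      (Nat.choose m j : Int) * (xs.getD (i + j) 0 + xs.getD (i + j + 1) 0))
      = ∑ j ∈ Finset.range (m + 2), (Nat.choose (m + 1) j : Int) * xs.getD (i + j) 0 :=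
    pv_pascal m (fun k => xs.getD (i + k) 0)
  rw [hid]

theorem pv_pyGetD01 (ys : List Int) :
    PySem.List.pyGetD ys 0 0 * 10 + PySem.List.pyGetD ys 1 0
      = ys.getD 0 0 * 10 + ys.getD 1 0 := by
  rw [show (0 : Int) = ((0 : Nat) : Int) by norm_num, PySem.List.pyGetD_natCast,
      show (1 : Int) = ((1 : Nat) : Int) by norm_num, PySem.List.pyGetD_natCast]

-- A's recursion computes the binomial closed form mod 10
theorem pv_go_spec (fuel : Nat) (xs : List Int) (h3 : 3 ≤ xs.length)
    (hf : xs.length ≤ fuel + 1) :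
    sum_namenum_go fuel xs
      = 10 * (pvS (xs.length - 2) 0 xs % 10) + (pvS (xs.length - 2) 1 xs % 10) := by
  induction fuel generalizing xs with
  | zero => omega
  | succ f ih =>
    have hne : (xs.length == 2) = false := by simp; omega
    rw [sum_namenum_go, hne]
    simp only [Bool.false_eq_true, if_false]
    by_cases hlen : xs.length = 3
    · -- step xs has length 2; one more unfolding returns its two entries
      have hsl : (sum_namenum_step xs).length = 2 := by rw [pv_length_step]; omega
      obtain ⟨f', rfl⟩ : ∃ f', f = f' + 1 := ⟨f - 1, by omega⟩
      rw [sum_namenum_go, show ((sum_namenum_step xs).length == 2) = true by simp [hsl]]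
      simp only [if_true]
      rw [pv_pyGetD01]
      have h0 : (sum_namenum_step xs).getD 0 0 % 10 = (sum_namenum_step xs).getD 0 0 := by
        rw [pv_step_getD xs 0 (by omega)]
        exact Int.emod_emod_of_dvd _ dvd_rfl
      have h1 : (sum_namenum_step xs).getD 1 0 % 10 = (sum_namenum_step xs).getD 1 0 := by
        rw [pv_step_getD xs 1 (by omega)]
        exact Int.emod_emod_of_dvd _ dvd_rfl
      have hS0 : pvS 0 0 (sum_namenum_step xs) % 10 = pvS 1 0 xs % 10 :=
        pvS_step xs 0 0 (by omega) (by omega)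
      have hS1 : pvS 0 1 (sum_namenum_step xs) % 10 = pvS 1 1 xs % 10 :=
        pvS_step xs 1 0 (by omega) (by omega)
      have e0 : pvS 0 0 (sum_namenum_step xs) = (sum_namenum_step xs).getD 0 0 := by
        simp [pvS]
      have e1 : pvS 0 1 (sum_namenum_step xs) = (sum_namenum_step xs).getD 1 0 := by
        simp [pvS]
      rw [hlen, show 3 - 2 = 1 from rfl, ← hS0, ← hS1, e0, e1, h0, h1]
      ring
    · have hsl : (sum_namenum_step xs).length = xs.length - 1 := pv_length_step xs
      rw [ih (sum_namenum_step xs) (by omega) (by omega)]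
      have hS0 := pvS_step xs 0 ((xs.length - 1) - 2) (by omega) (by omega)
      have hS1 := pvS_step xs 1 ((xs.length - 1) - 2) (by omega) (by omega)
      rw [hsl, hS0, hS1, show (xs.length - 1) - 2 + 1 = xs.length - 2 by omega]

-- exactness of the incremental binomial update c = c*(m-j) // (j+1)
theorem pv_c_step (M t : Nat) (ht : t ≤ M) :
    PySem.Int.floordiv ((Nat.choose M t : Int) * ((M : Int) - (t : Int))) ((t : Int) + 1)
      = (Nat.choose M (t + 1) : Int) := by
  rcases Nat.lt_or_ge t M with hlt | hge
  · have hsub : (M : Int) - (t : Int) = ((M - t : Nat) : Int) := by push_cast [Nat.cast_sub hlt.le]; ring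
    rw [hsub, show ((Nat.choose M t : Int) * ((M - t : Nat) : Int)) = ((Nat.choose M t * (M - t) : Nat) : Int) by push_cast; ring]
    rw [show ((t : Int) + 1) = ((t + 1 : Nat) : Int) by push_cast; ring]
    rw [PySem.Int.floordiv_natCast]
    rw [← Nat.choose_succ_right_eq]
    rw [Nat.mul_div_cancel _ (by omega)]
  · have : t = M := by omega
    subst this
    simp [PySem.Int.floordiv, Nat.choose_succ_self]

-- loop invariant of B's single pass
theorem pv_fold_inv (xs : List Int) (M : Nat) (t : Nat) (ht : t ≤ M + 1) :
    ((List.range t).map (fun k : Nat => (0 : Int) + (k : Int))).foldl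
      (fun (acc : Int × Int × Int) j =>
        (acc.1 + acc.2.2 * PySem.List.pyGetD xs j 0,
         acc.2.1 + acc.2.2 * PySem.List.pyGetD xs (j + 1) 0,
         PySem.Int.floordiv (acc.2.2 * (((M : Int)) - j)) (j + 1))) ((0 : Int), (0 : Int), (1 : Int))
    = (∑ j ∈ Finset.range t, (Nat.choose M j : Int) * xs.getD j 0,
       ∑ j ∈ Finset.range t, (Nat.choose M j : Int) * xs.getD (j + 1) 0,
       (Nat.choose M t : Int)) := by
  induction t with
  | zero => simp
  | succ t ih =>
    rw [List.range_succ, List.map_append, List.foldl_append, ih (by omega)]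
    simp only [List.map_cons, List.map_nil, List.foldl_cons, List.foldl_nil]
    have hz : (0 : Int) + (t : Int) = (t : Int) := by ring
    rw [hz]
    refine Prod.ext ?_ (Prod.ext ?_ ?_)
    · simp only [PySem.List.pyGetD_natCast]
      rw [Finset.sum_range_succ]
    · simp only []
      rw [show ((t : Int) + 1) = ((t + 1 : Nat) : Int) by push_cast; ring,
          PySem.List.pyGetD_natCast]
      rw [Finset.sum_range_succ]
    · simp only []
      exact pv_c_step M t (by omega)

-- B computes the same closed form
theorem pv_alt_spec (xs : List Int) (h3 : 3 ≤ xs.length) :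
    sum_namenum_alt xs
      = 10 * (pvS (xs.length - 2) 0 xs % 10) + (pvS (xs.length - 2) 1 xs % 10) := by
  unfold sum_namenum_alt
  have hn : (((xs.length : Int)) == 2) = false := by simp; omega
  simp only [hn, Bool.false_eq_true, if_false]
  have hM : (xs.length : Int) - 2 = ((xs.length - 2 : Nat) : Int) := by omega
  rw [hM, PySem.List.pyRange_one]
  have htn : ((((xs.length - 2 : Nat) : Int)) + 1 - 0).toNat = (xs.length - 2) + 1 := by omega
  rw [htn]
  rw [pv_fold_inv xs (xs.length - 2) ((xs.length - 2) + 1) (le_refl _)]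
  rw [PySem.Int.mod_eq_emod_of_pos (by norm_num), PySem.Int.mod_eq_emod_of_pos (by norm_num)]
  have e0 : (∑ j ∈ Finset.range ((xs.length - 2) + 1), (Nat.choose (xs.length - 2) j : Int) * xs.getD j 0)
      = pvS (xs.length - 2) 0 xs := by
    unfold pvS
    exact Finset.sum_congr rfl (fun j _ => by rw [Nat.zero_add])
  have e1 : (∑ j ∈ Finset.range ((xs.length - 2) + 1), (Nat.choose (xs.length - 2) j : Int) * xs.getD (j + 1) 0)
      = pvS (xs.length - 2) 1 xs := by
    unfold pvS
    exact Finset.sum_congr rfl (fun j _ => by rw [Nat.add_comm j 1])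
  rw [e0, e1]
  ring

-- ===== VERDICT (by name: the statement is the Claim_ definition above) =====
theorem sum_namenum_spec : Claim_equal_sum_namenum := by
  intro xs _ hpre
  unfold Spec_sum_namenum
  unfold Pre_sum_namenum at hpre
  rcases eq_or_lt_of_le hpre with h2 | h3
  · have hl : xs.length = 2 := h2.symm
    simp [sum_namenum, sum_namenum_alt, sum_namenum_go, hl]
  · rw [pv_alt_spec xs h3]
    unfold sum_namenum
    exact pv_go_spec xs.length xs h3 (by omega)
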